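-- pv_equiv track=rewrite | github.com/renosdim/renosdim-algo-assignments | assignment-2025-1/bts.py | identify_blocks
-- ===== SOURCE A (Python) =====
-- def identify_blocks(s):
--     blocks = []
--     i = len(s) - 1
--     processed_indices = set()
--
--     while i >= 0:
--         if i in processed_indices:
--             i -= 1
--             continue
--
--         if s[i] == '0':
--             if i < len(s) - 1:
--                 r_start = i + 1
--                 r_end = r_start
--                 while r_end < len(s) and s[r_end] == '-':
--                     processed_indices.add(r_end)
--                     r_end += 1
--                 if r_end > r_start:
--                     r_end -= 1
--                     blocks.append(('R', r_start, r_end, r_end - r_start + 1))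
--
--             j = i - 1
--             while j >= 0 and s[j] != '+':
--                 j -= 1
--             if j >= 0:
--                 l_start = j
--                 l_end = l_start
--                 k = l_start + 1
--                 while k < i and s[k] == '-':
--                     l_end = k
--                     k += 1
--                 blocks.append(('L', l_start, l_end, l_end - l_start + 1))
--                 for idx in range(l_start, l_end + 1):
--                     processed_indices.add(idx)
--             processed_indices.add(i)
--         i -= 1
--
--     unique_blocks = []
--     seen = set()
--     for block in blocks:
--         if block not in seen:
--             seen.add(block)
--             unique_blocks.append(block)
--     unique_blocks.sort(key=lambda x: x[2], reverse=True)
--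
--     return unique_blocks
-- ===== SOURCE B (Python) =====
-- def identify_blocks(s):
--     # One right-to-left pipeline over precomputed tables:
--     # prev_plus[t] = nearest '+' index <= t (or -1); run[t] = length of the '-' run starting at t.
--     n = len(s)
--     prev_plus = []
--     last = -1
--     for t in range(n):
--         if s[t] == '+':
--             last = t
--         prev_plus.append(last)
--     run = [0] * (n + 1)
--     for t in range(n - 1, -1, -1):
--         if s[t] == '-':
--             run[t] = run[t + 1] + 1
--     blocks = []
--     for i in range(n - 1, -1, -1):
--         if s[i] != '0':
--             continue
--         if i + 1 < n and run[i + 1] > 0: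
--             blocks.append(('R', i + 1, i + run[i + 1], run[i + 1]))
--         j = prev_plus[i - 1] if i > 0 else -1
--         if j >= 0:
--             d = min(run[j + 1], i - 1 - j)
--             blocks.append(('L', j, j + d, d + 1))
--     unique_blocks = []
--     seen = set()
--     for b in blocks:
--         if b not in seen:
--             seen.add(b)
--             unique_blocks.append(b)
--     unique_blocks.sort(key=lambda x: x[2], reverse=True)
--     return unique_blocks
-- ===== Notes on version B (the rewrite author's own statement) =====
-- stated objective: alternative
-- what changed: B replaces A's per-zero rescans (rightward dash scan, leftward '+' scan, and re-scan of the dash run after the '+') by two precomputed tables (nearest '+' index to the left, dash-run length at each position), so each zero is handled by table lookups instead of scans.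
import Mathlib
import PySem

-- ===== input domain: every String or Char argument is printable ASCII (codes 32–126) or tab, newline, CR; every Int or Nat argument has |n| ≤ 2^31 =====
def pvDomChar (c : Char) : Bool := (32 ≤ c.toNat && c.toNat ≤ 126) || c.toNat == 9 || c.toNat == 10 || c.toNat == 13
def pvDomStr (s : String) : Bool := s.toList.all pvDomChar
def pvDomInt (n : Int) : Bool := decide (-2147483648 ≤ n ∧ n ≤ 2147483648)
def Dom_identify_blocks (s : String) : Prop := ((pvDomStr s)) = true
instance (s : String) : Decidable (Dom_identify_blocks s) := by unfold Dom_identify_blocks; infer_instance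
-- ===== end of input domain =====

-- B replaces A's per-zero rescans by two precomputed tables (nearest '+' to the left and
-- '-'-run lengths); objective: alternative. Equivalence is on the return value.
-- All loops are ported as structural recursion on a fuel counter that the callers supply
-- large enough to cover every iteration the Python loop performs (fuel is a totality device
-- only; the lemmas below show the results do not depend on it once sufficient).

-- ===== PORT A =====
-- while r_end < len(s) and s[r_end] == '-': processed_indices.add(r_end); r_end += 1
def pvRScan (cs : List Char) (fuel : Nat) (rend : Int) (p : PySem.Set Int) : Int × PySem.Set Int :=
  match fuel with
  | 0 => (rend, p)
  | fuel + 1 =>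
    if rend < (cs.length : Int) ∧ PySem.List.pyGet? cs rend = some '-' then
      pvRScan cs fuel (rend + 1) (PySem.Set.add p rend)
    else (rend, p)

-- while j >= 0 and s[j] != '+': j -= 1
def pvJScan (cs : List Char) (fuel : Nat) (j : Int) : Int :=
  match fuel with
  | 0 => j
  | fuel + 1 =>
    if 0 ≤ j ∧ PySem.List.pyGet? cs j ≠ some '+' then pvJScan cs fuel (j - 1) else j

-- while k < i and s[k] == '-': l_end = k; k += 1
def pvKScan (cs : List Char) (fuel : Nat) (k i lend : Int) : Int :=
  match fuel with
  | 0 => lend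
  | fuel + 1 =>
    if k < i ∧ PySem.List.pyGet? cs k = some '-' then pvKScan cs fuel (k + 1) i k else lend

-- the main 'while i >= 0' loop of A, threading blocks and processed_indices
def pvALoop (cs : List Char) (fuel : Nat) (i : Int) (p : PySem.Set Int)
    (blocks : List (String × Int × Int × Int)) : List (String × Int × Int × Int) :=
  match fuel with
  | 0 => blocks
  | fuel + 1 =>
    if 0 ≤ i then
      if PySem.Set.contains p i then pvALoop cs fuel (i - 1) p blocks
      else if PySem.List.pyGet? cs i = some '0' then
        let st1 : List (String × Int × Int × Int) × PySem.Set Int :=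
          if i < (cs.length : Int) - 1 then
            let rstart := i + 1
            let r := pvRScan cs (cs.length + 1) rstart p
            if r.1 > rstart then
              (blocks ++ [("R", rstart, r.1 - 1, (r.1 - 1) - rstart + 1)], r.2)
            else (blocks, r.2)
          else (blocks, p)
        let j := pvJScan cs (cs.length + 1) (i - 1)
        let st2 : List (String × Int × Int × Int) × PySem.Set Int :=
          if 0 ≤ j then
            let lend := pvKScan cs (cs.length + 1) (j + 1) i j
            (st1.1 ++ [("L", j, lend, lend - j + 1)],
             (PySem.List.pyRange j (lend + 1) 1).foldl PySem.Set.add st1.2)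
          else st1
        pvALoop cs fuel (i - 1) (PySem.Set.add st2.2 i) st2.1
      else pvALoop cs fuel (i - 1) p blocks
    else blocks

-- the first-occurrence dedup loop (identical code in Source A and Source B; shared helper)
def pvDedupe (blocks : List (String × Int × Int × Int)) : List (String × Int × Int × Int) :=
  (blocks.foldl
    (fun acc b => if PySem.Set.contains acc.2 b then acc else (acc.1 ++ [b], PySem.Set.add acc.2 b))
    (([] : List (String × Int × Int × Int)), (PySem.Set.empty : PySem.Set (String × Int × Int × Int)))).1

def identify_blocks (s : String) : List (String × Int × Int × Int) :=
  let cs := s.toList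
  PySem.List.sorted
    (pvDedupe (pvALoop cs cs.length ((cs.length : Int) - 1) PySem.Set.empty []))
    (fun b => b.2.2.1) true

-- ===== PORT B =====
-- prev_plus table: last = -1; for t in range(n): if s[t] == '+': last = t; append last
def pvPPAux (cs : List Char) (t : Int) (last : Int) : List Int :=
  match cs with
  | [] => []
  | c :: rest =>
    let last' := if c = '+' then t else last
    last' :: pvPPAux rest (t + 1) last'

-- run table built right-to-left: run[t] = run[t+1] + 1 if s[t] == '-' else 0; run[n] = 0
def pvRunTbl (cs : List Char) : List Int :=
  match cs with
  | [] => [0]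
  | c :: rest =>
    let r := pvRunTbl rest
    (if c = '-' then r.headD 0 + 1 else 0) :: r

-- for i in range(n-1, -1, -1): table lookups only
def pvBLoop (cs : List Char) (pp run : List Int) (fuel : Nat) (i : Int)
    (blocks : List (String × Int × Int × Int)) : List (String × Int × Int × Int) :=
  match fuel with
  | 0 => blocks
  | fuel + 1 =>
    if 0 ≤ i then
      let blocks' :=
        if PySem.List.pyGet? cs i ≠ some '0' then blocks
        else
          let blocks1 :=
            if i + 1 < (cs.length : Int) ∧ 0 < PySem.List.pyGetD run (i + 1) 0 then
              blocks ++ [("R", i + 1, i + PySem.List.pyGetD run (i + 1) 0, PySem.List.pyGetD run (i + 1) 0)]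
            else blocks
          let j := if 0 < i then PySem.List.pyGetD pp (i - 1) (-1) else -1
          if 0 ≤ j then
            let d := min (PySem.List.pyGetD run (j + 1) 0) (i - 1 - j)
            blocks1 ++ [("L", j, j + d, d + 1)]
          else blocks1
      pvBLoop cs pp run fuel (i - 1) blocks'
    else blocks

def identify_blocks_alt (s : String) : List (String × Int × Int × Int) :=
  let cs := s.toList
  PySem.List.sorted
    (pvDedupe (pvBLoop cs (pvPPAux cs 0 (-1)) (pvRunTbl cs) cs.length ((cs.length : Int) - 1) []))
    (fun b => b.2.2.1) true

-- ===== PRECONDITION & SPEC =====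
def Spec_identify_blocks (s : String) (out : List (String × Int × Int × Int)) : Prop := out = identify_blocks_alt s
instance (s : String) (out : List (String × Int × Int × Int)) : Decidable (Spec_identify_blocks s out) := by unfold Spec_identify_blocks; infer_instance

-- ===== CLAIM (what is proved, stated in full; the proofs are below) =====
def Claim_equal_identify_blocks : Prop := ∀ (s : String), Dom_identify_blocks s → Spec_identify_blocks s (identify_blocks s)

-- ===== LEMMAS AND PROOFS =====

-- length of the '-' run at the head of a list (proof-side characterisation of both scans)
def pvRunSpec (cs : List Char) : Int :=
  match cs with
  | [] => 0
  | c :: rest => if c = '-' then pvRunSpec rest + 1 else 0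

theorem pvRunSpec_nonneg (cs : List Char) : 0 ≤ pvRunSpec cs := by
  induction cs with
  | nil => simp [pvRunSpec]
  | cons c rest ih =>
    by_cases h : c = '-'
    · simp only [pvRunSpec, h, if_true]; omega
    · simp [pvRunSpec, h]

theorem pvRunSpec_dash (cs : List Char) : ∀ (m : Nat), (m : Int) < pvRunSpec cs → cs[m]? = some '-' := by
  induction cs with
  | nil => intro m h; simp [pvRunSpec] at h; omega
  | cons c rest ih =>
    intro m h
    by_cases hc : c = '-'
    · cases m with
      | zero => simp [hc]
      | succ k =>
        simp only [pvRunSpec, hc, if_true] at h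
        have : (k : Int) < pvRunSpec rest := by push_cast at h ⊢; omega
        simpa using ih k this
    · simp [pvRunSpec, hc] at h; omega

theorem pvRunSpec_drop_pos (cs : List Char) (t : Nat) (ht : t < cs.length) (hc : cs[t] = '-') :
    pvRunSpec (cs.drop t) = pvRunSpec (cs.drop (t + 1)) + 1 := by
  rw [← List.getElem_cons_drop ht, pvRunSpec]
  simp [hc]

theorem pvRunSpec_drop_zero (cs : List Char) (t : Nat) (h : t ≥ cs.length ∨ (∃ ht : t < cs.length, cs[t] ≠ '-')) :
    pvRunSpec (cs.drop t) = 0 := by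
  rcases h with h | ⟨ht, hc⟩
  · rw [List.drop_eq_nil_of_le h]; rfl
  · rw [← List.getElem_cons_drop ht, pvRunSpec]; simp [hc]

theorem pvRunTbl_head (cs : List Char) : (pvRunTbl cs).headD 0 = pvRunSpec cs := by
  induction cs with
  | nil => rfl
  | cons c rest ih => simp only [pvRunTbl, pvRunSpec, List.headD_cons]; rw [ih]

theorem pvRunTbl_getD (cs : List Char) : ∀ (t : Nat), t ≤ cs.length →
    (pvRunTbl cs).getD t 0 = pvRunSpec (cs.drop t) := by
  induction cs with
  | nil =>
    intro t ht
    have h0 : t = 0 := by simpa using ht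
    subst h0; rfl
  | cons c rest ih =>
    intro t ht
    cases t with
    | zero =>
      simp only [pvRunTbl, List.getD_cons_zero, List.drop_zero, pvRunSpec]
      rw [pvRunTbl_head rest]
    | succ k =>
      simp only [pvRunTbl, List.getD_cons_succ, List.drop_succ_cons]
      exact ih k (by simpa using ht)

theorem pvJScan_le (cs : List Char) : ∀ (fuel : Nat) (j : Int), pvJScan cs fuel j ≤ j := by
  intro fuel
  induction fuel with
  | zero => intro j; simp [pvJScan]
  | succ fuel ih =>
    intro j
    rw [pvJScan]
    by_cases h : 0 ≤ j ∧ PySem.List.pyGet? cs j ≠ some '+'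
    · rw [if_pos h]
      have := ih (j - 1)
      omega
    · rw [if_neg h]

theorem pvJScan_neg (cs : List Char) : ∀ (fuel : Nat) (j : Int), j < 0 → pvJScan cs fuel j = j := by
  intro fuel j hj
  cases fuel with
  | zero => rfl
  | succ fuel => rw [pvJScan, if_neg (by omega : ¬(0 ≤ j ∧ PySem.List.pyGet? cs j ≠ some '+'))]

theorem pvJScan_plus (cs : List Char) : ∀ (fuel : Nat) (j : Int), j + 2 ≤ (fuel : Int) →
    0 ≤ pvJScan cs fuel j → PySem.List.pyGet? cs (pvJScan cs fuel j) = some '+' := by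
  intro fuel
  induction fuel with
  | zero =>
    intro j hf h0
    rw [pvJScan] at h0
    exfalso
    simp at hf
    omega
  | succ fuel ih =>
    intro j hf
    rw [pvJScan]
    by_cases h : 0 ≤ j ∧ PySem.List.pyGet? cs j ≠ some '+'
    · rw [if_pos h]
      exact ih (j - 1) (by push_cast at hf ⊢; omega)
    · rw [if_neg h]
      intro h0
      push Not at h
      by_contra hne
      exact hne (h h0)

-- the scan's value does not depend on the fuel once it is sufficient
theorem pvJScan_fuel (cs : List Char) : ∀ (f1 : Nat) (f2 : Nat) (j : Int),
    j + 2 ≤ (f1 : Int) → j + 2 ≤ (f2 : Int) → pvJScan cs f1 j = pvJScan cs f2 j := by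
  intro f1
  induction f1 with
  | zero =>
    intro f2 j h1 h2
    have hj : j < 0 := by omega
    rw [pvJScan, pvJScan_neg cs f2 j hj]
  | succ f1 ih =>
    intro f2 j h1 h2
    by_cases h : 0 ≤ j ∧ PySem.List.pyGet? cs j ≠ some '+'
    · have hf2 : ∃ f2', f2 = f2' + 1 := ⟨f2 - 1, by omega⟩
      rcases hf2 with ⟨f2', rfl⟩
      rw [pvJScan, if_pos h, pvJScan, if_pos h]
      exact ih f2' (j - 1) (by push_cast at h1 ⊢; omega) (by push_cast at h2 ⊢; omega)
    · rcases Nat.eq_zero_or_pos f2 with hz | hp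
      · subst hz
        conv_lhs => rw [pvJScan]
        rw [if_neg h]
        rfl
      · have hf2 : ∃ f2', f2 = f2' + 1 := ⟨f2 - 1, by omega⟩
        rcases hf2 with ⟨f2', rfl⟩
        rw [pvJScan, if_neg h, pvJScan, if_neg h]

-- the value of A's leftward scan at position pre.length: one unfolding
theorem pvJScan_step (pre suf : List Char) (c : Char) :
    pvJScan (pre ++ c :: suf) ((pre ++ c :: suf).length + 1) (pre.length : Int)
      = if c = '+' then (pre.length : Int)
        else pvJScan (pre ++ c :: suf) ((pre ++ c :: suf).length + 1) ((pre.length : Int) - 1) := by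
  rw [pvJScan]
  by_cases hc : c = '+'
  · simp [hc]
  · rw [if_pos (by simp [hc] : 0 ≤ (pre.length : Int) ∧ PySem.List.pyGet? (pre ++ c :: suf) (pre.length : Int) ≠ some '+'), if_neg hc]
    refine pvJScan_fuel _ _ _ _ (by simp; omega) (by simp; omega)

-- the prev_plus table holds exactly A's leftward '+'-scan values
theorem pvPPAux_getD (suf : List Char) : ∀ (pre : List Char) (k : Nat) (d : Int), k < suf.length →
    (pvPPAux suf (pre.length : Int) (pvJScan (pre ++ suf) ((pre ++ suf).length + 1) ((pre.length : Int) - 1))).getD k d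
      = pvJScan (pre ++ suf) ((pre ++ suf).length + 1) ((pre.length : Int) + (k : Int)) := by
  induction suf with
  | nil => intro pre k d hk; simp at hk
  | cons c rest ih =>
    intro pre k d hk
    have hlast : (if c = '+' then (pre.length : Int)
          else pvJScan (pre ++ c :: rest) ((pre ++ c :: rest).length + 1) ((pre.length : Int) - 1))
        = pvJScan (pre ++ c :: rest) ((pre ++ c :: rest).length + 1) (pre.length : Int) :=
      (pvJScan_step pre rest c).symm
    cases k with
    | zero =>
      simp only [pvPPAux, List.getD_cons_zero]
      rw [hlast]; norm_num
    | succ k' =>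
      simp only [pvPPAux, List.getD_cons_succ]
      rw [hlast]
      have h2 := ih (pre ++ [c]) k' d (by simpa using hk)
      simp only [List.append_assoc, List.cons_append, List.nil_append, List.length_append,
        List.length_cons, List.length_nil] at h2
      rw [show (pre ++ c :: rest).length = pre.length + (rest.length + 1) by simp]
      push_cast at h2 ⊢
      rw [show (pre.length : Int) + 1 - 1 = (pre.length : Int) by ring] at h2
      rw [h2]
      ring_nf

theorem pvRScan_fst (cs : List Char) : ∀ (fuel : Nat) (r : Int) (p : PySem.Set Int), 0 ≤ r →
    (cs.length : Int) - r + 1 ≤ (fuel : Int) →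
    (pvRScan cs fuel r p).1 = r + pvRunSpec (cs.drop r.toNat) := by
  intro fuel
  induction fuel with
  | zero =>
    intro r p hr hf
    rw [pvRScan, pvRunSpec_drop_zero cs r.toNat (Or.inl (by omega))]
    ring
  | succ fuel ih =>
    intro r p hr hf
    rw [pvRScan]
    by_cases h : r < (cs.length : Int) ∧ PySem.List.pyGet? cs r = some '-'
    · rw [if_pos h]
      have hlt : r.toNat < cs.length := by omega
      have hget : cs[r.toNat] = '-' := by
        have := h.2
        rw [PySem.List.pyGet?_of_nonneg cs hr] at this
        exact (List.getElem?_eq_some_iff.mp this).choose_spec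
      rw [ih (r + 1) _ (by omega) (by push_cast at hf ⊢; omega)]
      rw [pvRunSpec_drop_pos cs r.toNat hlt hget]
      have : (r + 1).toNat = r.toNat + 1 := by omega
      rw [this]; ring
    · rw [if_neg h]
      push Not at h
      by_cases hlt : r < (cs.length : Int)
      · have h2 := h hlt
        have hlt' : r.toNat < cs.length := by omega
        rw [PySem.List.pyGet?_of_nonneg cs hr] at h2
        have hne : cs[r.toNat] ≠ '-' := by
          intro hc
          exact h2 (by rw [List.getElem?_eq_some_iff]; exact ⟨hlt', hc⟩)
        rw [pvRunSpec_drop_zero cs r.toNat (Or.inr ⟨hlt', hne⟩)]; ring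
      · rw [pvRunSpec_drop_zero cs r.toNat (Or.inl (by omega))]; ring

theorem pvRScan_snd (cs : List Char) : ∀ (fuel : Nat) (r : Int) (p : PySem.Set Int) (x : Int),
    x ∈ (pvRScan cs fuel r p).2 → x ∈ p ∨ r ≤ x := by
  intro fuel
  induction fuel with
  | zero => intro r p x hx; exact Or.inl hx
  | succ fuel ih =>
    intro r p x
    rw [pvRScan]
    by_cases h : r < (cs.length : Int) ∧ PySem.List.pyGet? cs r = some '-'
    · rw [if_pos h]
      intro hx
      rcases ih (r + 1) _ x hx with h' | h'
      · rcases (PySem.Set.mem_add p r x).mp h' with h'' | h''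
        · exact Or.inl h''
        · exact Or.inr (by omega)
      · exact Or.inr (by omega)
    · rw [if_neg h]
      exact Or.inl

theorem pvKScan_eq (cs : List Char) : ∀ (fuel : Nat) (k i lend : Int),
    lend = k - 1 → 0 ≤ k → k ≤ i → i - k + 1 ≤ (fuel : Int) →
    pvKScan cs fuel k i lend = k - 1 + min (pvRunSpec (cs.drop k.toNat)) (i - k) := by
  intro fuel
  induction fuel with
  | zero => intro k i lend hl h0 hk hf; omega
  | succ fuel ih =>
    intro k i lend hl h0 hk hf
    rw [pvKScan]
    by_cases h : k < i ∧ PySem.List.pyGet? cs k = some '-'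
    · rw [if_pos h]
      have hlt : k.toNat < cs.length := by
        by_contra hh
        have := h.2
        rw [PySem.List.pyGet?_of_nonneg cs h0, List.getElem?_eq_none (by omega)] at this
        simp at this
      have hget : cs[k.toNat] = '-' := by
        have := h.2
        rw [PySem.List.pyGet?_of_nonneg cs h0] at this
        exact (List.getElem?_eq_some_iff.mp this).choose_spec
      rw [ih (k + 1) i k (by ring) (by omega) (by omega) (by push_cast at hf ⊢; omega)]
      rw [pvRunSpec_drop_pos cs k.toNat hlt hget]
      have h1 : (k + 1).toNat = k.toNat + 1 := by omega
      rw [h1]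
      have h2 := pvRunSpec_nonneg (cs.drop (k.toNat + 1))
      omega
    · rw [if_neg h]
      push Not at h
      have hrs : pvRunSpec (cs.drop k.toNat) = 0 ∨ ¬ k < i := by
        by_cases hki : k < i
        · left
          have h2 := h hki
          by_cases hlt : k.toNat < cs.length
          · rw [PySem.List.pyGet?_of_nonneg cs h0] at h2
            refine pvRunSpec_drop_zero cs k.toNat (Or.inr ⟨hlt, ?_⟩)
            intro hc
            exact h2 (by rw [List.getElem?_eq_some_iff]; exact ⟨hlt, hc⟩)
          · exact pvRunSpec_drop_zero cs k.toNat (Or.inl (by omega))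
        · exact Or.inr hki
      have h2 := pvRunSpec_nonneg (cs.drop k.toNat)
      rcases hrs with h3 | h3 <;> omega

theorem pvFoldlAdd_mem (xs : List Int) : ∀ (s : PySem.Set Int) (x : Int),
    x ∈ xs.foldl PySem.Set.add s → x ∈ s ∨ x ∈ xs := by
  induction xs with
  | nil => intro s x h; exact Or.inl h
  | cons y ys ih =>
    intro s x h
    simp only [List.foldl_cons] at h
    rcases ih _ _ h with h' | h'
    · rcases (PySem.Set.mem_add s y x).mp h' with h'' | h''
      · exact Or.inl h''
      · exact Or.inr (by simp [h''])
    · exact Or.inr (List.mem_cons_of_mem _ h')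

theorem pvLoop_eq (cs : List Char) : ∀ (fuel : Nat) (i : Int) (p : PySem.Set Int)
    (blocks : List (String × Int × Int × Int)),
    i < (cs.length : Int) →
    (∀ x : Int, x ∈ p → x ≤ i → PySem.List.pyGet? cs x ≠ some '0') →
    pvALoop cs fuel i p blocks = pvBLoop cs (pvPPAux cs 0 (-1)) (pvRunTbl cs) fuel i blocks := by
  intro fuel
  induction fuel with
  | zero => intro i p blocks hlen hinv; rfl
  | succ fuel ih =>
    intro i p blocks hlen hinv
    by_cases h0 : 0 ≤ i
    case neg => rw [pvALoop, if_neg h0, pvBLoop, if_neg h0]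
    -- both sides compute the same `j`
    have hjeq : (if 0 < i then PySem.List.pyGetD (pvPPAux cs 0 (-1)) (i - 1) (-1) else -1)
        = pvJScan cs (cs.length + 1) (i - 1) := by
      by_cases hi0 : 0 < i
      · rw [if_pos hi0]
        have hk : (i - 1).toNat < cs.length := by omega
        rw [show i - 1 = (((i-1).toNat : Nat) : Int) by omega, PySem.List.pyGetD_natCast]
        have hpp := pvPPAux_getD cs [] (i - 1).toNat (-1) hk
        simp only [List.nil_append, List.length_nil, Nat.cast_zero, zero_sub, zero_add] at hpp
        rw [pvJScan_neg cs (cs.length + 1) (-1) (by omega)] at hpp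
        exact hpp
      · rw [if_neg hi0]
        have hie : i = 0 := by omega
        subst hie
        rw [show (0:Int) - 1 = -1 by ring, pvJScan_neg cs (cs.length + 1) (-1) (by omega)]
    rw [pvALoop, if_pos h0, pvBLoop, if_pos h0]
    by_cases hc : PySem.Set.contains p i
    · -- i in processed_indices: A skips; the invariant says s[i] != '0', so B appends nothing
      have hmem : i ∈ p := by simpa [PySem.Set.contains] using hc
      have hnz : PySem.List.pyGet? cs i ≠ some '0' := hinv i hmem (le_refl i)
      rw [if_pos hc, if_pos hnz]
      exact ih (i - 1) p blocks (by omega) (fun x hx hxi => hinv x hx (by omega))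
    · rw [if_neg hc]
      by_cases hz : PySem.List.pyGet? cs i = some '0'
      · -- the '0' case: each scan of A equals the table lookup of B
        rw [if_pos hz, if_neg (not_not_intro hz)]
        have hrfst := pvRScan_fst cs (cs.length + 1) (i + 1) p (by omega) (by push_cast; omega)
        set rv := pvRunSpec (cs.drop (i + 1).toNat) with hrv
        have hrvnn : 0 ≤ rv := pvRunSpec_nonneg _
        have hrunB : PySem.List.pyGetD (pvRunTbl cs) (i + 1) 0 = rv := by
          rw [show i + 1 = (((i+1).toNat : Nat) : Int) by omega, PySem.List.pyGetD_natCast]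
          exact pvRunTbl_getD cs (i + 1).toNat (by omega)
        rw [hjeq]
        set j := pvJScan cs (cs.length + 1) (i - 1) with hj
        have hjle : j ≤ i - 1 := pvJScan_le cs (cs.length + 1) (i - 1)
        -- the processed set produced by the R-scan
        set p1 : PySem.Set Int := (pvRScan cs (cs.length + 1) (i + 1) p).2 with hp1
        have hp1sub : ∀ x : Int, x ∈ p1 → x ∈ p ∨ i + 1 ≤ x :=
          fun x => pvRScan_snd cs (cs.length + 1) (i + 1) p x
        -- A's st1 in resolved form
        have hst1 : (if i < (cs.length : Int) - 1 then
              let rstart := i + 1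
              let r := pvRScan cs (cs.length + 1) rstart p
              if r.1 > rstart then
                (blocks ++ [("R", rstart, r.1 - 1, (r.1 - 1) - rstart + 1)], r.2)
              else (blocks, r.2)
            else (blocks, p))
            = ((if i + 1 < (cs.length : Int) ∧ 0 < PySem.List.pyGetD (pvRunTbl cs) (i + 1) 0 then
                blocks ++ [("R", i + 1, i + PySem.List.pyGetD (pvRunTbl cs) (i + 1) 0,
                  PySem.List.pyGetD (pvRunTbl cs) (i + 1) 0)]
              else blocks),
              (if i < (cs.length : Int) - 1 then p1 else p)) := by
          rw [hrunB]
          by_cases hn : i < (cs.length : Int) - 1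
          · rw [if_pos hn, if_pos hn]
            by_cases hpos : 0 < rv
            · rw [if_pos (by omega : i + 1 < (cs.length : Int) ∧ 0 < rv)]
              simp only [hrfst]
              rw [if_pos (by omega)]
              have e1 : i + 1 + rv - 1 = i + rv := by ring
              rw [e1]
              have e2 : i + rv - (i + 1) + 1 = rv := by ring
              rw [e2]
            · rw [if_neg (by omega : ¬(i + 1 < (cs.length : Int) ∧ 0 < rv))]
              simp only [hrfst]
              rw [if_neg (by omega)]
          · rw [if_neg hn, if_neg hn, if_neg (by omega : ¬(i + 1 < (cs.length : Int) ∧ 0 < rv))]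
        rw [hst1]
        set st1p : PySem.Set Int := if i < (cs.length : Int) - 1 then p1 else p with hst1p
        set blocks1 : List (String × Int × Int × Int) :=
          (if i + 1 < (cs.length : Int) ∧ 0 < PySem.List.pyGetD (pvRunTbl cs) (i + 1) 0 then
            blocks ++ [("R", i + 1, i + PySem.List.pyGetD (pvRunTbl cs) (i + 1) 0,
              PySem.List.pyGetD (pvRunTbl cs) (i + 1) 0)]
          else blocks) with hblocks1
        have hst1psub : ∀ x : Int, x ∈ st1p → x ∈ p ∨ i + 1 ≤ x := by
          intro x hx
          rw [hst1p] at hx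
          by_cases hn : i < (cs.length : Int) - 1
          · rw [if_pos hn] at hx; exact hp1sub x hx
          · rw [if_neg hn] at hx; exact Or.inl hx
        by_cases hjpos : 0 ≤ j
        · -- L-block appended on both sides
          have hplus : PySem.List.pyGet? cs j = some '+' :=
            pvJScan_plus cs (cs.length + 1) (i - 1) (by push_cast; omega) hjpos
          set rvj := pvRunSpec (cs.drop (j + 1).toNat) with hrvj
          have hrvjnn : 0 ≤ rvj := pvRunSpec_nonneg _
          have hrunBj : PySem.List.pyGetD (pvRunTbl cs) (j + 1) 0 = rvj := by
            rw [show j + 1 = (((j+1).toNat : Nat) : Int) by omega, PySem.List.pyGetD_natCast]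
            exact pvRunTbl_getD cs (j + 1).toNat (by omega)
          have hlend : pvKScan cs (cs.length + 1) (j + 1) i j = j + min rvj (i - 1 - j) := by
            have hk := pvKScan_eq cs (cs.length + 1) (j + 1) i j (by ring) (by omega) (by omega)
              (by push_cast; omega)
            rw [hk]
            have : i - (j + 1) = i - 1 - j := by ring
            rw [this]
            omega
          have e3 : j + min rvj (i - 1 - j) - j + 1 = min rvj (i - 1 - j) + 1 := by ring
          simp only [if_pos hjpos, hlend, hrunBj, e3]
          refine ih (i - 1) _ _ (by omega) ?_
          set d : Int := min rvj (i - 1 - j) with hd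
          have hdnn : 0 ≤ d := by omega
          intro x hx hxle
          rcases (PySem.Set.mem_add _ i x).mp hx with hx' | hx'
          · rcases pvFoldlAdd_mem _ _ _ hx' with hx'' | hx''
            · rcases hst1psub x hx'' with hx3 | hx3
              · exact hinv x hx3 (by omega)
              · omega
            · -- x is inside the L-run: s[x] is '+' or '-'
              rw [PySem.List.mem_pyRange_one] at hx''
              by_cases hxj : x = j
              · subst hxj; rw [hplus]; simp
              · have hxr : j + 1 ≤ x ∧ x ≤ j + d := by omega
                have hm : ((x - (j + 1)).toNat : Int) = x - (j + 1) := by omega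
                have hdash := pvRunSpec_dash (cs.drop (j + 1).toNat) (x - (j + 1)).toNat (by rw [hm]; omega)
                rw [List.getElem?_drop] at hdash
                have hidx : (j + 1).toNat + (x - (j + 1)).toNat = x.toNat := by omega
                rw [hidx] at hdash
                rw [PySem.List.pyGet?_of_nonneg cs (by omega : (0:Int) ≤ x), hdash]
                simp
          · omega
        · -- no '+' to the left: nothing appended on either side
          simp only [if_neg hjpos]
          refine ih (i - 1) _ blocks1 (by omega) ?_
          intro x hx hxle
          rcases (PySem.Set.mem_add _ i x).mp hx with hx' | hx'
          · rcases hst1psub x hx' with hx3 | hx3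
            · exact hinv x hx3 (by omega)
            · omega
          · omega
      · rw [if_neg hz, if_pos hz]
        exact ih (i - 1) p blocks (by omega) (fun x hx hxi => hinv x hx (by omega))

-- ===== VERDICT (by name: the statement is the Claim_ definition above) =====
theorem identify_blocks_spec : Claim_equal_identify_blocks := by
  intro s _
  unfold Spec_identify_blocks identify_blocks identify_blocks_alt
  have h := pvLoop_eq s.toList s.toList.length ((s.toList.length : Int) - 1)
    PySem.Set.empty [] (by omega) (by intro x hx; simp [PySem.Set.empty] at hx)
  simp only [h]
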